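-- pv_equiv track=rewrite | github.com/daewoonglee/programmers | lev1/숫자 문자열과 영단어.py | solution
-- ===== SOURCE A (Python) =====
-- def solution(s):
--     word2num = {
--         "zero": "0",
--         "one": "1",
--         "two": "2",
--         "three": "3",
--         "four": "4",
--         "five": "5",
--         "six": "6",
--         "seven": "7",
--         "eight": "8",
--         "nine": "9"
--     }
--     s = s.lower()
--     N = len(s)
--     ans = ""
--     # 0.16021884605288506
--     #idx = 0
--     #while idx < N:
--     #    if s[idx].isdigit():
--     #        ans += s[idx]
--     #        idx += 1
--     #        for j in [3, 4, 5]: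
--     #            if s[idx:idx+j] in word2num:
--     #                ans += word2num[s[idx:idx+j]]
--     #                idx += j
--     #                break
--     #return int(ans)
--
--     # code refactoring - 0.29748598858714104
--     #start, end = 0, 1
--     #while end <= N:
--     #    if s[start:end].isdigit():
--     #        ans += s[start:end]
--     #        start += 1
--     #    elif s[start:end] in word2num:
--     #        ans += word2num[s[start:end]]
--     #        start = end
--     #    end += 1
--     #return int(ans)
--
--     # code refactoring (R) - 0.0979218315333128
--     for k, v in word2num.items():
--         s = s.replace(k, v)
--     return int(s)
-- ===== SOURCE B (Python) =====
-- def solution(s):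
--     word2num = {
--         "zero": "0", "one": "1", "two": "2", "three": "3", "four": "4",
--         "five": "5", "six": "6", "seven": "7", "eight": "8", "nine": "9"
--     }
--     s = s.lower()
--     res = []
--     i = 0
--     n = len(s)
--     while i < n:
--         matched = False
--         for j in (3, 4, 5):
--             w = s[i:i + j]
--             if w in word2num:
--                 res.append(word2num[w])
--                 i += j
--                 matched = True
--                 break
--         if not matched:
--             res.append(s[i])
--             i += 1
--     return int("".join(res))
-- ===== Notes on version B (the rewrite author's own statement) =====
-- stated objective: alternative
-- what changed: Replaces A's ten sequential str.replace passes over the whole string by a single left-to-right scan that matches slices of length 3/4/5 against a word-to-digit dict and passes all other characters through, then converts once with int().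
import Mathlib
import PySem

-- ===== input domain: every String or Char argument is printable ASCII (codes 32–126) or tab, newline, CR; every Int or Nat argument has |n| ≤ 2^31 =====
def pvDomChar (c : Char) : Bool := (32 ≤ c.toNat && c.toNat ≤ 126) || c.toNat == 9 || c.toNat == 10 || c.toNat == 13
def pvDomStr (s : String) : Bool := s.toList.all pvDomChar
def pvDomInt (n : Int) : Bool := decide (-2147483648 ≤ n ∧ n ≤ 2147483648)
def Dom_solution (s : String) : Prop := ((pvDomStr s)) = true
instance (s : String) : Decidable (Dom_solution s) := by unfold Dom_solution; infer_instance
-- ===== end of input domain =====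

-- B replaces A's ten sequential str.replace passes by a single left-to-right scan matching
-- 3/4/5-length slices against the word->digit dict; return values proved equal on Pre_.


-- ===== PORT A =====
def solution (s : String) : Int :=
  let word2num : PySem.Dict String String := PySem.Dict.ofList
    [("zero","0"),("one","1"),("two","2"),("three","3"),("four","4"),
     ("five","5"),("six","6"),("seven","7"),("eight","8"),("nine","9")]
  let s1 := PySem.Str.lower s
  let s2 := word2num.items.foldl (fun t kv => PySem.Str.replace t kv.1 kv.2) s1
  (PySem.Int.ofStr? s2).getD 0   -- int(s); Pre_ excludes exactly the ValueError inputs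

-- ===== PORT B =====
-- Source B's dict, with string keys/values as char lists (the sanctioned List Char view of str)
def pvWord2numB : List (List Char × List Char) :=
  [(['z','e','r','o'],['0']), (['o','n','e'],['1']), (['t','w','o'],['2']),
   (['t','h','r','e','e'],['3']), (['f','o','u','r'],['4']), (['f','i','v','e'],['5']),
   (['s','i','x'],['6']), (['s','e','v','e','n'],['7']), (['e','i','g','h','t'],['8']),
   (['n','i','n','e'],['9'])]

-- Source B's while loop: try slices of length 3, 4, 5 at position i, else copy one char
def pvScanB : List Char → List Char
  | [] => []
  | c :: t =>
    match pvWord2numB.lookup ((c :: t).take 3) with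
    | some v => v ++ pvScanB ((c :: t).drop 3)
    | none =>
      match pvWord2numB.lookup ((c :: t).take 4) with
      | some v => v ++ pvScanB ((c :: t).drop 4)
      | none =>
        match pvWord2numB.lookup ((c :: t).take 5) with
        | some v => v ++ pvScanB ((c :: t).drop 5)
        | none => c :: pvScanB t
  termination_by l => l.length
  decreasing_by all_goals (simp only [List.length_drop, List.length_cons]; omega)

def solution_alt (s : String) : Int :=
  let s1 := PySem.Str.lower s
  let res := pvScanB s1.toList
  (PySem.Int.ofChars? res).getD 0   -- int("".join(res))

-- ===== PRECONDITION & SPEC =====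
def pvIsWS (c : Char) : Bool := c == ' ' || c == '\t' || c == '\n' || c == '\r'
def pvIsDig (c : Char) : Bool := decide ('0' ≤ c) && decide (c ≤ '9')

-- grammar check: the (lower-cased, stripped, unsigned) input is a nonempty sequence of
-- decimal digits and the ten spelled digits, with single '_' separators allowed between
-- tokens and optional trailing whitespace — exactly the strings int() accepts after A's
-- replacements; outside this grammar A's int(s) raises ValueError.
def pvGram : Bool → List Char → Bool
  | false, [] => false
  | true, [] => true
  | true, '_' :: r => pvGram false r
  | _, 'z'::'e'::'r'::'o'::r => pvGram true r
  | _, 'o'::'n'::'e'::r => pvGram true r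
  | _, 't'::'w'::'o'::r => pvGram true r
  | _, 't'::'h'::'r'::'e'::'e'::r => pvGram true r
  | _, 'f'::'o'::'u'::'r'::r => pvGram true r
  | _, 'f'::'i'::'v'::'e'::r => pvGram true r
  | _, 's'::'i'::'x'::r => pvGram true r
  | _, 's'::'e'::'v'::'e'::'n'::r => pvGram true r
  | _, 'e'::'i'::'g'::'h'::'t'::r => pvGram true r
  | _, 'n'::'i'::'n'::'e'::r => pvGram true r
  | m, c :: r => if pvIsDig c then pvGram true r else (m && pvIsWS c && r.all pvIsWS)

def pvStripSign : List Char → List Char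
  | [] => []
  | c :: t => if c = '+' ∨ c = '-' then t else c :: t

-- Pre_: after lower-casing, stripping surrounding whitespace and an optional sign, the
-- input is in the digit/spelled-digit grammar above; this is exactly where A's final
-- int() returns instead of raising ValueError.
def Pre_solution (s : String) : Prop :=
  pvGram false (pvStripSign ((PySem.Chars.lower s.toList).dropWhile pvIsWS)) = true
instance (s : String) : Decidable (Pre_solution s) := by unfold Pre_solution; infer_instance

def pvWitness_solution : String := "-One_42"

def Spec_solution (s : String) (out : Int) : Prop := out = solution_alt s
instance (s : String) (out : Int) : Decidable (Spec_solution s out) := by unfold Spec_solution; infer_instance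

-- ===== CLAIM (what is proved, stated in full; the proofs are below) =====
def Claim_equal_solution : Prop := ∀ (s : String), Dom_solution s → Pre_solution s → Spec_solution s (solution s)

-- ===== LEMMAS AND PROOFS =====

-- the ten words and their digits, indexed
def pvWd (i : Fin 10) : List Char := (pvWord2numB.map Prod.fst).getD i.val []
def pvDg (i : Fin 10) : Char := (['0','1','2','3','4','5','6','7','8','9']).getD i.val ' '

-- a token of the decomposition: a pass-through character or a spelled digit
def pvGood : Char ⊕ Fin 10 → Prop
  | .inl c => ¬('a' ≤ c ∧ c ≤ 'z')
  | .inr _ => True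

-- how a token reads after the first j replace passes
def pvRender (j : Nat) : Char ⊕ Fin 10 → List Char
  | .inl c => [c]
  | .inr w => if w.val < j then [pvDg w] else pvWd w

-- fuel-indexed leftmost-non-overlapping replace scanner (= PySem.Chars.replace.go sans accumulator)
def pvRep (old new : List Char) : Nat → List Char → List Char
  | _, [] => []
  | 0, l => l
  | fuel+1, c :: t =>
    if old.isPrefixOf (c :: t) then new ++ pvRep old new fuel ((c :: t).drop old.length)
    else c :: pvRep old new fuel t

theorem pvRep_go (old new : List Char) : ∀ (fuel : Nat) (l acc : List Char),
    PySem.Chars.replace.go old new fuel l acc = acc.reverse ++ pvRep old new fuel l := by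
  intro fuel
  induction fuel with
  | zero => intro l acc; cases l <;> simp [PySem.Chars.replace.go, pvRep]
  | succ f ih =>
    intro l acc
    cases l with
    | nil => simp [PySem.Chars.replace.go, pvRep]
    | cons c t =>
      simp only [PySem.Chars.replace.go, pvRep]
      split
      · rw [ih]; simp
      · rw [ih]; simp

theorem replace_eq_pvRep (l old new : List Char) (h : old.isEmpty = false) :
    PySem.Chars.replace l old new = pvRep old new l.length l := by
  rw [PySem.Chars.replace, h]
  simpa using pvRep_go old new l.length l []

-- finite facts about the ten words (kernel-checked in Bool form, then lifted)
set_option maxRecDepth 4096 in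
theorem pvF_len : ∀ i : Fin 10, (pvWd i).length = 3 ∨ (pvWd i).length = 4 ∨ (pvWd i).length = 5 := by decide

set_option maxRecDepth 4096 in
theorem pvF_letterB : ∀ i : Fin 10,
    (pvWd i).all (fun c => decide ('a' ≤ c) && decide (c ≤ 'z')) = true := by decide

theorem pvF_letter : ∀ i : Fin 10, ∀ c ∈ pvWd i, 'a' ≤ c ∧ c ≤ 'z' := by
  intro i c hc
  have := pvF_letterB i
  rw [List.all_eq_true] at this
  simpa using this c hc

set_option maxRecDepth 4096 in
theorem pvF_dg : ∀ i : Fin 10, '0' ≤ pvDg i ∧ pvDg i ≤ '9' := by decide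

set_option maxRecDepth 4096 in
theorem pvF_nopfxB : ∀ i j : Fin 10, i ≠ j → (pvWd i).isPrefixOf (pvWd j) = false := by decide

theorem pvF_nopfx (i j : Fin 10) (hij : i ≠ j) : ¬ pvWd i <+: pvWd j := by
  intro hp
  rw [← List.isPrefixOf_iff_prefix] at hp
  rw [pvF_nopfxB i j hij] at hp
  exact Bool.false_ne_true hp

set_option maxRecDepth 4096 in
theorem pvF_d2B : ∀ j : Fin 10, ∀ m : Fin 5, 0 < m.val → m.val < (pvWd j).length →
    ((List.finRange 10).any (fun w => (List.finRange 5).any (fun p =>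
        0 < p.val && p.val < (pvWd w).length &&
        ((pvWd w).drop p.val == (pvWd j).take m.val))) = true) →
    ∀ w' : Fin 10, ((pvWd j).drop m.val).isPrefixOf (pvWd w') = false ∧
      (pvWd w').isPrefixOf ((pvWd j).drop m.val) = false := by decide

set_option maxRecDepth 4096 in
theorem pvF_dropmidB : ∀ i j : Fin 10, ∀ p : Fin 5, 0 < p.val → p.val < (pvWd j).length →
    (pvWd i).isPrefixOf ((pvWd j).drop p.val) = false := by decide

theorem pvF_dropmid (i j : Fin 10) (p : Nat) (hp0 : 0 < p) (hp : p < (pvWd j).length) :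
    ¬ pvWd i <+: (pvWd j).drop p := by
  intro hpf
  have h5 : p < 5 := by
    rcases pvF_len j with h | h | h <;> omega
  rw [← List.isPrefixOf_iff_prefix] at hpf
  rw [pvF_dropmidB i j ⟨p, h5⟩ hp0 hp] at hpf
  exact Bool.false_ne_true hpf

set_option maxRecDepth 8192 in
theorem pvF_lookup : ∀ i : Fin 10,
    ((pvWd i).length = 3 → pvWord2numB.lookup ((pvWd i).take 3) = some [pvDg i]) ∧
    ((pvWd i).length = 4 → pvWord2numB.lookup ((pvWd i).take 3) = none ∧
        pvWord2numB.lookup ((pvWd i).take 4) = some [pvDg i]) ∧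
    ((pvWd i).length = 5 → pvWord2numB.lookup ((pvWd i).take 3) = none ∧
        pvWord2numB.lookup ((pvWd i).take 4) = none ∧
        pvWord2numB.lookup ((pvWd i).take 5) = some [pvDg i]) := by decide

-- generic prefix splitting
theorem pvPrefix_split {v a b : List Char} (h : v <+: a ++ b) (hl : a.length ≤ v.length) :
    a <+: v ∧ v.drop a.length <+: b := by
  obtain ⟨w, hw⟩ := h
  have ha : a = v.take a.length := by
    have h1 : (a ++ b).take a.length = a := List.take_left ..
    have h2 : (v ++ w).take a.length = v.take a.length := List.take_append_of_le_length hl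
    rw [← hw] at h1; rw [h2] at h1; exact h1.symm
  constructor
  · exact ha ▸ List.take_prefix _ _
  · have hv : v = a ++ v.drop a.length := by
      conv_lhs => rw [← List.take_append_drop a.length v, ← ha]
    rw [hv, List.append_assoc] at hw
    have hb : b = v.drop a.length ++ w := (List.append_cancel_left hw).symm
    exact ⟨w, hb.symm⟩

-- depth-2 boundary analysis: when a word suffix equals a prefix of pvWd j, the remaining
-- tail of pvWd j is never a prefix of a rendered token stream
theorem pvNoTail2 (j : Fin 10) (m : Nat) (hm0 : 0 < m) (hm : m < (pvWd j).length)
    (htail : ∃ w : Fin 10, ∃ p : Fin 5, 0 < p.val ∧ p.val < (pvWd w).length ∧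
        (pvWd w).drop p.val = (pvWd j).take m)
    (J : Nat) (ts : List (Char ⊕ Fin 10)) (hg : ∀ t ∈ ts, pvGood t) :
    ¬ ((pvWd j).drop m <+: ts.flatMap (pvRender J)) := by
  intro hpre
  have hm5 : m < 5 := by rcases pvF_len j with h | h | h <;> omega
  have htailB : (List.finRange 10).any (fun w => (List.finRange 5).any (fun p =>
      0 < p.val && p.val < (pvWd w).length &&
      ((pvWd w).drop p.val == (pvWd j).take m))) = true := by
    obtain ⟨w, p, hp0, hp, he⟩ := htail
    rw [List.any_eq_true]
    refine ⟨w, List.mem_finRange w, ?_⟩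
    rw [List.any_eq_true]
    exact ⟨p, List.mem_finRange p, by simp [hp0, hp, he]⟩
  have hd2 := pvF_d2B j ⟨m, hm5⟩ hm0 hm htailB
  have hvne : (pvWd j).drop m ≠ [] := by
    intro h; rw [List.drop_eq_nil_iff] at h; omega
  obtain ⟨vh, vt, hv⟩ : ∃ vh vt, (pvWd j).drop m = vh :: vt := by
    cases hvv : (pvWd j).drop m with
    | nil => exact absurd hvv hvne
    | cons a b => exact ⟨a, b, rfl⟩
  have hvh_mem : vh ∈ pvWd j := List.drop_subset m _ (hv ▸ List.mem_cons_self ..)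
  have hvh_letter : 'a' ≤ vh ∧ vh ≤ 'z' := pvF_letter j vh hvh_mem
  cases ts with
  | nil =>
    rw [List.flatMap_nil, List.prefix_nil] at hpre
    exact hvne hpre
  | cons t ts' =>
    rw [List.flatMap_cons] at hpre
    cases t with
    | inl c =>
      rw [hv] at hpre
      simp only [pvRender, List.cons_append] at hpre
      obtain ⟨hhd, -⟩ := (List.cons_prefix_cons).mp hpre
      have hc := hg (.inl c) (List.mem_cons_self ..)
      simp only [pvGood] at hc
      exact hc (hhd ▸ hvh_letter)
    | inr w =>
      by_cases hw : w.val < J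
      · rw [hv] at hpre
        simp only [pvRender, if_pos hw, List.cons_append] at hpre
        obtain ⟨hhd, -⟩ := (List.cons_prefix_cons).mp hpre
        have h9 := (pvF_dg w).2
        have : 'a' ≤ '9' := le_trans (hhd ▸ hvh_letter).1 h9
        exact (by decide : ¬ ('a' ≤ '9')) this
      · simp only [pvRender, if_neg hw] at hpre
        rcases Nat.lt_or_ge (pvWd w).length ((pvWd j).drop m).length with hlt | hge
        swap
        · have hvp : (pvWd j).drop m <+: pvWd w := (List.isPrefix_append_of_length hge).mp hpre
          rw [← List.isPrefixOf_iff_prefix, (hd2 w).1] at hvp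
          exact Bool.false_ne_true hvp
        · have hsp := (pvPrefix_split hpre (le_of_lt hlt)).1
          rw [← List.isPrefixOf_iff_prefix, (hd2 w).2] at hsp
          exact Bool.false_ne_true hsp

theorem pvScanNoMatch (old new : List Char) : ∀ (z rest : List Char) (fuel : Nat),
    (∀ p, p < z.length → ¬ old <+: (z.drop p ++ rest)) → z.length + rest.length ≤ fuel →
    pvRep old new fuel (z ++ rest) = z ++ pvRep old new (fuel - z.length) rest := by
  intro z
  induction z with
  | nil => intro rest fuel _ _; simp
  | cons c z' ih =>
    intro rest fuel hnm hf
    cases fuel with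
    | zero => exfalso; simp at hf
    | succ f =>
      have hnm0 : ¬ old <+: c :: (z' ++ rest) := by
        have := hnm 0 (by simp)
        simpa using this
      show pvRep old new (f+1) (c :: (z' ++ rest)) = _
      simp only [pvRep]
      rw [if_neg (by simpa [List.isPrefixOf_iff_prefix] using hnm0)]
      have hnm' : ∀ p, p < z'.length → ¬ old <+: (z'.drop p ++ rest) := by
        intro p hp
        have := hnm (p+1) (by simp; omega)
        simpa using this
      have hf' : z'.length + rest.length ≤ f := by simp at hf; omega
      rw [ih rest f hnm' hf']
      simp only [List.cons_append, List.length_cons, Nat.succ_sub_succ]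

theorem pvStage (j : Fin 10) : ∀ (ts : List (Char ⊕ Fin 10)) (fuel : Nat),
    (∀ t ∈ ts, pvGood t) → (ts.flatMap (pvRender j.val)).length ≤ fuel →
    pvRep (pvWd j) [pvDg j] fuel (ts.flatMap (pvRender j.val)) = ts.flatMap (pvRender (j.val+1)) := by
  intro ts
  induction ts with
  | nil => intro fuel _ _; cases fuel <;> simp [pvRep]
  | cons t ts' ih =>
    intro fuel hg hf
    have hg' : ∀ t ∈ ts', pvGood t := fun t ht => hg t (List.mem_cons_of_mem _ ht)
    obtain ⟨w0, wt, hW⟩ : ∃ w0 wt, pvWd j = w0 :: wt := by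
      cases hWW : pvWd j with
      | nil => exfalso; have := pvF_len j; rw [hWW] at this; simp at this
      | cons a b => exact ⟨a, b, rfl⟩
    have hw0_letter : 'a' ≤ w0 ∧ w0 ≤ 'z' :=
      pvF_letter j w0 (hW ▸ List.mem_cons_self ..)
    cases t with
    | inl c =>
      simp only [List.flatMap_cons, pvRender, List.singleton_append] at hf ⊢
      cases fuel with
      | zero => exfalso; simp at hf
      | succ f =>
        simp only [pvRep]
        rw [if_neg]
        · rw [ih f hg' (by rw [List.length_cons] at hf; omega)]
        · rw [Bool.not_eq_true, ← Bool.not_eq_true, List.isPrefixOf_iff_prefix]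
          intro hp
          rw [hW] at hp
          obtain ⟨hhd, -⟩ := (List.cons_prefix_cons).mp hp
          have hc := hg (.inl c) (List.mem_cons_self ..)
          simp only [pvGood] at hc
          exact hc (hhd ▸ hw0_letter)
    | inr w =>
      by_cases hwj : w = j
      · subst hwj
        have hnlt : ¬ w.val < w.val := lt_irrefl _
        simp only [List.flatMap_cons, pvRender, if_neg hnlt, if_pos (Nat.lt_succ_self _)] at hf ⊢
        cases fuel with
        | zero =>
          exfalso
          have := pvF_len w
          rw [List.length_append] at hf
          omega
        | succ f =>
          rw [hW, List.cons_append]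
          simp only [pvRep]
          have hdrop : List.drop (w0 :: wt).length (w0 :: (wt ++ ts'.flatMap (pvRender w.val)))
              = ts'.flatMap (pvRender w.val) := by
            rw [← List.cons_append]
            exact List.drop_left ..
          rw [if_pos, hdrop]
          · simp only [List.singleton_append]
            congr 1
            have hih := ih f hg'
              (by rw [List.length_append] at hf; have := pvF_len w; omega)
            rw [hW] at hih
            exact hih
          · rw [List.isPrefixOf_iff_prefix, ← List.cons_append]
            exact List.prefix_append ..
      · by_cases hwlt : w.val < j.val
        · -- already replaced: single digit char
          simp only [List.flatMap_cons, pvRender, if_pos hwlt,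
            if_pos (Nat.lt_succ_of_lt hwlt), List.singleton_append] at hf ⊢
          cases fuel with
          | zero => exfalso; simp at hf
          | succ f =>
            simp only [pvRep]
            rw [if_neg]
            · rw [ih f hg' (by rw [List.length_cons] at hf; omega)]
            · rw [Bool.not_eq_true, ← Bool.not_eq_true, List.isPrefixOf_iff_prefix]
              intro hp
              rw [hW] at hp
              obtain ⟨hhd, -⟩ := (List.cons_prefix_cons).mp hp
              have h9 := (pvF_dg w).2
              exact (by decide : ¬ ('a' ≤ '9')) (le_trans (hhd ▸ hw0_letter).1 h9)
        · -- untouched word ≠ pvWd j : scan straight through it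
          have hjw : j.val < w.val := by
            rcases Nat.lt_or_ge j.val w.val with h | h
            · exact h
            · exfalso
              rcases Nat.lt_or_ge w.val j.val with h2 | h2
              · exact hwlt h2
              · exact hwj (Fin.ext (by omega))
          have hnlt1 : ¬ w.val < j.val + 1 := by omega
          simp only [List.flatMap_cons, pvRender, if_neg hwlt, if_neg hnlt1] at hf ⊢
          have hnm : ∀ p, p < (pvWd w).length →
              ¬ pvWd j <+: ((pvWd w).drop p ++ ts'.flatMap (pvRender j.val)) := by
            intro p hp hmatch
            rcases Nat.eq_zero_or_pos p with rfl | hp0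
            · rw [List.drop_zero] at hmatch
              rcases Nat.lt_or_ge (pvWd w).length (pvWd j).length with hlt | hge
              · exact pvF_nopfx w j hwj (pvPrefix_split hmatch (le_of_lt hlt)).1
              · exact pvF_nopfx j w (fun h => hwj h.symm)
                  ((List.isPrefix_append_of_length hge).mp hmatch)
            · rcases Nat.lt_or_ge ((pvWd w).drop p).length (pvWd j).length with hlt | hge
              · have hsp := pvPrefix_split hmatch (le_of_lt hlt)
                have hm0 : 0 < ((pvWd w).drop p).length := by
                  rw [List.length_drop]; omega
                have hp5 : p < 5 := by rcases pvF_len w with h | h | h <;> omega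
                refine pvNoTail2 j ((pvWd w).drop p).length hm0 hlt
                  ⟨w, ⟨p, hp5⟩, hp0, hp, ?_⟩ j.val ts' hg' hsp.2
                exact (List.prefix_iff_eq_take.mp hsp.1)
              · exact pvF_dropmid j w p hp0 hp
                  ((List.isPrefix_append_of_length hge).mp hmatch)
          rw [pvScanNoMatch (pvWd j) [pvDg j] (pvWd w) (ts'.flatMap (pvRender j.val)) fuel hnm
            (by rw [List.length_append] at hf; omega)]
          congr 1
          exact ih _ hg' (by rw [List.length_append] at hf; omega)

def pvReplOne (i : Fin 10) (l : List Char) : List Char := PySem.Chars.replace l (pvWd i) [pvDg i]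

theorem pvStep (i : Fin 10) (ts : List (Char ⊕ Fin 10)) (hg : ∀ t ∈ ts, pvGood t) :
    pvReplOne i (ts.flatMap (pvRender i.val)) = ts.flatMap (pvRender (i.val+1)) := by
  unfold pvReplOne
  rw [replace_eq_pvRep _ _ _ (by
    cases hW : pvWd i with
    | nil => exfalso; have := pvF_len i; rw [hW] at this; simp at this
    | cons a b => rfl)]
  exact pvStage i ts _ hg (le_refl _)

theorem pvChainA (ts : List (Char ⊕ Fin 10)) (hg : ∀ t ∈ ts, pvGood t) :
    pvReplOne 9 (pvReplOne 8 (pvReplOne 7 (pvReplOne 6 (pvReplOne 5 (pvReplOne 4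
      (pvReplOne 3 (pvReplOne 2 (pvReplOne 1 (pvReplOne 0
        (ts.flatMap (pvRender 0))))))))))) = ts.flatMap (pvRender 10) := by
  have h0 : pvReplOne 0 (ts.flatMap (pvRender 0)) = ts.flatMap (pvRender 1) := pvStep 0 ts hg
  have h1 : pvReplOne 1 (ts.flatMap (pvRender 1)) = ts.flatMap (pvRender 2) := pvStep 1 ts hg
  have h2 : pvReplOne 2 (ts.flatMap (pvRender 2)) = ts.flatMap (pvRender 3) := pvStep 2 ts hg
  have h3 : pvReplOne 3 (ts.flatMap (pvRender 3)) = ts.flatMap (pvRender 4) := pvStep 3 ts hg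
  have h4 : pvReplOne 4 (ts.flatMap (pvRender 4)) = ts.flatMap (pvRender 5) := pvStep 4 ts hg
  have h5 : pvReplOne 5 (ts.flatMap (pvRender 5)) = ts.flatMap (pvRender 6) := pvStep 5 ts hg
  have h6 : pvReplOne 6 (ts.flatMap (pvRender 6)) = ts.flatMap (pvRender 7) := pvStep 6 ts hg
  have h7 : pvReplOne 7 (ts.flatMap (pvRender 7)) = ts.flatMap (pvRender 8) := pvStep 7 ts hg
  have h8 : pvReplOne 8 (ts.flatMap (pvRender 8)) = ts.flatMap (pvRender 9) := pvStep 8 ts hg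
  have h9 : pvReplOne 9 (ts.flatMap (pvRender 9)) = ts.flatMap (pvRender 10) := pvStep 9 ts hg
  rw [h0, h1, h2, h3, h4, h5, h6, h7, h8, h9]

theorem pvLookupNone (c : Char) (hc : ¬('a' ≤ c ∧ c ≤ 'z')) (x : List Char) :
    pvWord2numB.lookup (c :: x) = none := by
  have hne : ∀ (d : Char), ('a' ≤ d ∧ d ≤ 'z') → (c == d) = false := by
    intro d hd
    rw [beq_eq_false_iff_ne]
    rintro rfl
    exact hc hd
  simp [pvWord2numB, List.lookup, List.cons_beq_cons,
    hne 'z' (by decide), hne 'o' (by decide), hne 't' (by decide), hne 'f' (by decide),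
    hne 's' (by decide), hne 'e' (by decide), hne 'n' (by decide)]

theorem pvLen4 {l : List Char} (h : l.length = 4) : ∃ a b c d, l = [a, b, c, d] := by
  rcases l with _ | ⟨a, _ | ⟨b, _ | ⟨c, _ | ⟨d, _ | ⟨e, tl⟩⟩⟩⟩⟩ <;> simp_all

theorem pvLen5 {l : List Char} (h : l.length = 5) : ∃ a b c d e, l = [a, b, c, d, e] := by
  rcases l with _ | ⟨a, _ | ⟨b, _ | ⟨c, _ | ⟨d, _ | ⟨e, _ | ⟨f, tl⟩⟩⟩⟩⟩⟩ <;> simp_all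

theorem pvScanLem (ts : List (Char ⊕ Fin 10)) (hg : ∀ t ∈ ts, pvGood t) :
    pvScanB (ts.flatMap (pvRender 0)) = ts.flatMap (pvRender 10) := by
  induction ts with
  | nil => simp [pvScanB]
  | cons t ts' ih =>
    have hg' : ∀ t ∈ ts', pvGood t := fun t ht => hg t (List.mem_cons_of_mem _ ht)
    have hih := ih hg'
    cases t with
    | inl c =>
      have hc := hg (.inl c) (List.mem_cons_self ..)
      simp only [pvGood] at hc
      simp only [List.flatMap_cons, pvRender, List.singleton_append]
      rw [pvScanB]
      have e3 : List.lookup (List.take 3 (c :: ts'.flatMap (pvRender 0))) pvWord2numB = none :=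
        pvLookupNone c hc _
      have e4 : List.lookup (List.take 4 (c :: ts'.flatMap (pvRender 0))) pvWord2numB = none :=
        pvLookupNone c hc _
      have e5 : List.lookup (List.take 5 (c :: ts'.flatMap (pvRender 0))) pvWord2numB = none :=
        pvLookupNone c hc _
      rw [e3, e4, e5]
      show c :: pvScanB (ts'.flatMap (pvRender 0)) = _
      rw [hih]
    | inr w =>
      have h10 : w.val < 10 := w.isLt
      simp only [List.flatMap_cons, pvRender, Nat.not_lt_zero, if_pos h10,
        List.singleton_append]
      rcases pvF_len w with h3 | h4 | h5
      · obtain ⟨a, b, c, hW⟩ := List.length_eq_three.mp h3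
        have hlk := (pvF_lookup w).1 h3
        rw [hW] at hlk ⊢
        show pvScanB (a :: (b :: c :: ts'.flatMap (pvRender 0))) = _
        rw [pvScanB]
        have e3 : List.lookup (List.take 3 (a :: b :: c :: ts'.flatMap (pvRender 0)))
            pvWord2numB = some [pvDg w] := hlk
        rw [e3]
        show [pvDg w] ++ pvScanB (ts'.flatMap (pvRender 0)) = _
        rw [hih]; rfl
      · obtain ⟨a, b, c, d, hW⟩ := pvLen4 h4
        obtain ⟨hlk3, hlk4⟩ := (pvF_lookup w).2.1 h4
        rw [hW] at hlk3 hlk4 ⊢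
        show pvScanB (a :: (b :: c :: d :: ts'.flatMap (pvRender 0))) = _
        rw [pvScanB]
        have e3 : List.lookup (List.take 3 (a :: b :: c :: d :: ts'.flatMap (pvRender 0)))
            pvWord2numB = none := hlk3
        have e4 : List.lookup (List.take 4 (a :: b :: c :: d :: ts'.flatMap (pvRender 0)))
            pvWord2numB = some [pvDg w] := hlk4
        rw [e3, e4]
        show [pvDg w] ++ pvScanB (ts'.flatMap (pvRender 0)) = _
        rw [hih]; rfl
      · obtain ⟨a, b, c, d, e, hW⟩ := pvLen5 h5
        obtain ⟨hlk3, hlk4, hlk5⟩ := (pvF_lookup w).2.2 h5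
        rw [hW] at hlk3 hlk4 hlk5 ⊢
        show pvScanB (a :: (b :: c :: d :: e :: ts'.flatMap (pvRender 0))) = _
        rw [pvScanB]
        have e3 : List.lookup (List.take 3 (a :: b :: c :: d :: e :: ts'.flatMap (pvRender 0)))
            pvWord2numB = none := hlk3
        have e4 : List.lookup (List.take 4 (a :: b :: c :: d :: e :: ts'.flatMap (pvRender 0)))
            pvWord2numB = none := hlk4
        have e5 : List.lookup (List.take 5 (a :: b :: c :: d :: e :: ts'.flatMap (pvRender 0)))
            pvWord2numB = some [pvDg w] := hlk5
        rw [e3, e4, e5]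
        show [pvDg w] ++ pvScanB (ts'.flatMap (pvRender 0)) = _
        rw [hih]; rfl

def pvDecomp (l : List Char) : Prop :=
  ∃ ts : List (Char ⊕ Fin 10), (∀ t ∈ ts, pvGood t) ∧ l = ts.flatMap (pvRender 0)

theorem pvWcons (i : Fin 10) (r : List Char) (h : pvDecomp r) : pvDecomp (pvWd i ++ r) := by
  obtain ⟨ts, hg, rfl⟩ := h
  refine ⟨.inr i :: ts, ?_, ?_⟩
  · intro t ht
    rcases List.mem_cons.mp ht with rfl | ht'
    · trivial
    · exact hg t ht'
  · rw [List.flatMap_cons]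
    simp [pvRender]

theorem pvCcons (c : Char) (r : List Char) (hc : ¬('a' ≤ c ∧ c ≤ 'z')) (h : pvDecomp r) :
    pvDecomp (c :: r) := by
  obtain ⟨ts, hg, rfl⟩ := h
  refine ⟨.inl c :: ts, ?_, ?_⟩
  · intro t ht
    rcases List.mem_cons.mp ht with rfl | ht'
    · exact hc
    · exact hg t ht'
  · rw [List.flatMap_cons]
    simp [pvRender]

theorem pvDigNotLetter (c : Char) (hd : pvIsDig c = true) : ¬('a' ≤ c ∧ c ≤ 'z') := by
  intro hcl
  simp only [pvIsDig, Bool.and_eq_true, decide_eq_true_eq] at hd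
  exact (by decide : ¬ ('a' ≤ '9')) (le_trans hcl.1 hd.2)

theorem pvWsNotLetter (c : Char) (hw : pvIsWS c = true) : ¬('a' ≤ c ∧ c ≤ 'z') := by
  intro hcl
  simp only [pvIsWS, Bool.or_eq_true, beq_iff_eq] at hw
  rcases hw with ((rfl | rfl) | rfl) | rfl <;> revert hcl <;> decide

theorem pvWsDecomp (r : List Char) (h : ∀ c ∈ r, pvIsWS c = true) : pvDecomp r := by
  induction r with
  | nil => exact ⟨[], by simp, by simp⟩
  | cons a r' ih =>
    exact pvCcons a r' (pvWsNotLetter a (h a (List.mem_cons_self ..)))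
      (ih fun c hc => h c (List.mem_cons_of_mem _ hc))

theorem pvDecomp_append (a b : List Char) (ha : pvDecomp a) (hb : pvDecomp b) :
    pvDecomp (a ++ b) := by
  obtain ⟨ts1, hg1, rfl⟩ := ha
  obtain ⟨ts2, hg2, rfl⟩ := hb
  refine ⟨ts1 ++ ts2, ?_, ?_⟩
  · intro t ht
    rcases List.mem_append.mp ht with h | h
    · exact hg1 t h
    · exact hg2 t h
  · rw [List.flatMap_append]

theorem pvExtract : ∀ (m : Bool) (l : List Char), pvGram m l = true → pvDecomp l := by
  refine pvGram.induct (motive := fun m l => pvGram m l = true → pvDecomp l)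
    ?_ ?_ ?_ ?_ ?_ ?_ ?_ ?_ ?_ ?_ ?_ ?_ ?_ ?_ ?_
  · intro h; exact absurd h (by simp [pvGram])
  · intro _; exact ⟨[], by simp, by simp⟩
  · intro r IH h; simp only [pvGram] at h; exact pvCcons '_' r (by decide) (IH h)
  · intro m r IH h; simp only [pvGram] at h; exact pvWcons 0 r (IH h)
  · intro m r IH h; simp only [pvGram] at h; exact pvWcons 1 r (IH h)
  · intro m r IH h; simp only [pvGram] at h; exact pvWcons 2 r (IH h)
  · intro m r IH h; simp only [pvGram] at h; exact pvWcons 3 r (IH h)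
  · intro m r IH h; simp only [pvGram] at h; exact pvWcons 4 r (IH h)
  · intro m r IH h; simp only [pvGram] at h; exact pvWcons 5 r (IH h)
  · intro m r IH h; simp only [pvGram] at h; exact pvWcons 6 r (IH h)
  · intro m r IH h; simp only [pvGram] at h; exact pvWcons 7 r (IH h)
  · intro m r IH h; simp only [pvGram] at h; exact pvWcons 8 r (IH h)
  · intro m r IH h; simp only [pvGram] at h; exact pvWcons 9 r (IH h)
  · intro m c r n0 n1 n2 n3 n4 n5 n6 n7 n8 n9 n10 hdig IH h
    rw [pvGram.eq_14 m c r n1 n2 n3 n4 n5 n6 n7 n8 n9 n10 n0, if_pos hdig] at h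
    exact pvCcons c r (pvDigNotLetter c hdig) (IH h)
  · intro m c r n0 n1 n2 n3 n4 n5 n6 n7 n8 n9 n10 hndig h
    rw [pvGram.eq_14 m c r n1 n2 n3 n4 n5 n6 n7 n8 n9 n10 n0, if_neg hndig] at h
    rw [Bool.and_eq_true, Bool.and_eq_true, List.all_eq_true] at h
    refine pvWsDecomp (c :: r) ?_
    intro x hx
    rcases List.mem_cons.mp hx with rfl | hx'
    · exact h.1.2
    · exact h.2 x hx'

theorem pvDecomp_full (s : String) (h : Pre_solution s) : pvDecomp (PySem.Chars.lower s.toList) := by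
  unfold Pre_solution at h
  have hsplit : PySem.Chars.lower s.toList =
      (PySem.Chars.lower s.toList).takeWhile pvIsWS ++
      (PySem.Chars.lower s.toList).dropWhile pvIsWS :=
    (List.takeWhile_append_dropWhile ..).symm
  rw [hsplit]
  refine pvDecomp_append _ _ (pvWsDecomp _ (fun c hc => List.mem_takeWhile_imp hc)) ?_
  have hbody := pvExtract false _ h
  cases hL1 : (PySem.Chars.lower s.toList).dropWhile pvIsWS with
  | nil => rw [hL1] at h; simp [pvStripSign, pvGram] at h
  | cons c t =>
    rw [hL1] at h hbody
    by_cases hsgn : c = '+' ∨ c = '-'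
    · rw [show pvStripSign (c :: t) = t from by simp [pvStripSign, hsgn]] at hbody
      refine pvCcons c t ?_ hbody
      rcases hsgn with rfl | rfl <;> decide
    · rwa [show pvStripSign (c :: t) = c :: t from by simp [pvStripSign, hsgn]] at hbody

-- ===== VERDICT (by name: the statement is the Claim_ definition above) =====
theorem solution_spec : Claim_equal_solution := by
  intro s _hdom hpre
  unfold Spec_solution
  obtain ⟨ts, hg, hL⟩ := pvDecomp_full s hpre
  have hitems : (PySem.Dict.ofList
      [("zero","0"),("one","1"),("two","2"),("three","3"),("four","4"),
       ("five","5"),("six","6"),("seven","7"),("eight","8"),("nine","9")]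
        : PySem.Dict String String).items =
      [("zero","0"),("one","1"),("two","2"),("three","3"),("four","4"),
       ("five","5"),("six","6"),("seven","7"),("eight","8"),("nine","9")] := by decide
  have hrepl : ∀ (i : Fin 10) (l : List Char),
      PySem.Chars.replace l (pvWd i) [pvDg i] = pvReplOne i l := fun _ _ => rfl
  calc solution s
      = (PySem.Int.ofChars? (ts.flatMap (pvRender 10))).getD 0 := by
        show (PySem.Int.ofStr? ((PySem.Dict.ofList
            [("zero","0"),("one","1"),("two","2"),("three","3"),("four","4"),
             ("five","5"),("six","6"),("seven","7"),("eight","8"),("nine","9")]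
              : PySem.Dict String String).items.foldl
            (fun t kv => PySem.Str.replace t kv.1 kv.2) (PySem.Str.lower s))).getD 0 = _
        rw [hitems]
        simp only [List.foldl_cons, List.foldl_nil]
        rw [PySem.Int.ofStr?]
        simp only [PySem.Str.toList_replace, PySem.Str.toList_lower]
        rw [show ("zero" : String).toList = pvWd 0 from rfl,
            show ("one" : String).toList = pvWd 1 from rfl,
            show ("two" : String).toList = pvWd 2 from rfl,
            show ("three" : String).toList = pvWd 3 from rfl,
            show ("four" : String).toList = pvWd 4 from rfl,
            show ("five" : String).toList = pvWd 5 from rfl,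
            show ("six" : String).toList = pvWd 6 from rfl,
            show ("seven" : String).toList = pvWd 7 from rfl,
            show ("eight" : String).toList = pvWd 8 from rfl,
            show ("nine" : String).toList = pvWd 9 from rfl,
            show ("0" : String).toList = [pvDg 0] from rfl,
            show ("1" : String).toList = [pvDg 1] from rfl,
            show ("2" : String).toList = [pvDg 2] from rfl,
            show ("3" : String).toList = [pvDg 3] from rfl,
            show ("4" : String).toList = [pvDg 4] from rfl,
            show ("5" : String).toList = [pvDg 5] from rfl,
            show ("6" : String).toList = [pvDg 6] from rfl,
            show ("7" : String).toList = [pvDg 7] from rfl,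
            show ("8" : String).toList = [pvDg 8] from rfl,
            show ("9" : String).toList = [pvDg 9] from rfl]
        simp only [hrepl]
        rw [hL, pvChainA ts hg]
    _ = solution_alt s := by
        show _ = (PySem.Int.ofChars? (pvScanB (PySem.Str.lower s).toList)).getD 0
        rw [PySem.Str.toList_lower, hL, pvScanLem ts hg]
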